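-- pv_equiv track=rewrite | github.com/eunseo-kim/Algorithm | programmers/2020 카카오 인턴십/수식 최대화.py | get_operators_priority
-- ===== SOURCE A (Python) =====
-- def get_operators_priority(operators):
--     def dfs(path):
--         if len(path) == 3:
--             cases.append(path)
--             return
--
--         for op in operators:
--             if op not in path:
--                 dfs(path + [op])
--
--     cases = []
--     dfs([])
--     return cases
-- ===== SOURCE B (Python) =====
-- def get_operators_priority(operators):
--     return [[a, b, c]
--             for a in operators
--             for b in operators if b != a
--             for c in operators if c != a and c != b]
-- ===== Notes on version B (the rewrite author's own statement) =====
-- stated objective: simpler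
-- what changed: Replaces the recursive backtracking DFS with a mutable accumulator by one fixed-depth triple-nested comprehension with inline distinctness guards.
import Mathlib
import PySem

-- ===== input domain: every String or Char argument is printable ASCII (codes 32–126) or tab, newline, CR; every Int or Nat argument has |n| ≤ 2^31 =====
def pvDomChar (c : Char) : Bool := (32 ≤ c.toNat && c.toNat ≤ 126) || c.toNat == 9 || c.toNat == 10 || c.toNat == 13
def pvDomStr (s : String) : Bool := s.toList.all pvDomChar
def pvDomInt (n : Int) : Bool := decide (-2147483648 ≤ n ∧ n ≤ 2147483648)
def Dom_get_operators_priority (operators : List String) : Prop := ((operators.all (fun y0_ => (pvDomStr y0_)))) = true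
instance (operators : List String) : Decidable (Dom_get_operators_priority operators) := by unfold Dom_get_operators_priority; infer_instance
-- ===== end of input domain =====

-- B replaces A's recursive backtracking DFS (mutable accumulator) by one fixed-depth
-- triple-nested comprehension with inline distinctness guards (objective: simpler).

-- ===== PORT A =====
-- dfs(path): the recursion is indexed by `remaining = 3 - len(path)`; in A, dfs is only
-- ever invoked with len(path) ≤ 3, so this transcription is exact on every call A makes.
-- `cases.append(path)` is the accumulator `cases ++ [path]`.
def pvDfsA (ops : List String) : Nat → List String → List (List String) → List (List String)
  | 0, path, cases => cases ++ [path]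
  | n+1, path, cases =>
      ops.foldl (fun cs op => if path.contains op then cs else pvDfsA ops n (path ++ [op]) cs) cases

def get_operators_priority (operators : List String) : List (List String) :=
  pvDfsA operators 3 [] []

-- ===== PORT B =====
-- [[a,b,c] for a in operators for b in operators if b != a for c in operators if c != a and c != b]
def get_operators_priority_alt (operators : List String) : List (List String) :=
  operators.flatMap (fun a =>
    operators.flatMap (fun b =>
      if b ≠ a then
        operators.flatMap (fun c => if c ≠ a ∧ c ≠ b then [[a, b, c]] else [])
      else []))

-- ===== PRECONDITION & SPEC =====
def Spec_get_operators_priority (operators : List String) (out : List (List String)) : Prop := out = get_operators_priority_alt operators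
instance (operators : List String) (out : List (List String)) : Decidable (Spec_get_operators_priority operators out) := by unfold Spec_get_operators_priority; infer_instance

-- ===== CLAIM =====
def Claim_equal_get_operators_priority : Prop := ∀ (operators : List String), Dom_get_operators_priority operators → Spec_get_operators_priority operators (get_operators_priority operators)

-- ===== LEMMAS AND PROOFS =====

theorem pvDfsA_acc (ops : List String) : ∀ (n : Nat) (path : List String)
    (cs : List (List String)), pvDfsA ops n path cs = cs ++ pvDfsA ops n path [] := by
  intro n
  induction n with
  | zero => intro path cs; simp [pvDfsA]
  | succ n ih =>
      intro path cs
      have hf : (fun (cs : List (List String)) (op : String) =>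
            if path.contains op then cs else pvDfsA ops n (path ++ [op]) cs)
          = (fun cs op => cs ++ (if path.contains op then [] else pvDfsA ops n (path ++ [op]) [])) := by
        funext cs op
        by_cases h : op ∈ path
        · simp [h]
        · simp [h, ih (path ++ [op]) cs]
      show List.foldl _ cs ops = cs ++ List.foldl _ [] ops
      rw [hf, PySem.List.foldl_append_eq_flatMap, PySem.List.foldl_append_eq_flatMap]
      simp

theorem pvDfsA_succ_nil (ops : List String) (n : Nat) (path : List String) :
    pvDfsA ops (n+1) path []
      = ops.flatMap (fun op => if path.contains op then [] else pvDfsA ops n (path ++ [op]) []) := by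
  have hf : (fun (cs : List (List String)) (op : String) =>
        if path.contains op then cs else pvDfsA ops n (path ++ [op]) cs)
      = (fun cs op => cs ++ (if path.contains op then [] else pvDfsA ops n (path ++ [op]) [])) := by
    funext cs op
    by_cases h : op ∈ path
    · simp [h]
    · simp [h, pvDfsA_acc ops n (path ++ [op]) cs]
  show List.foldl _ [] ops = _
  rw [hf, PySem.List.foldl_append_eq_flatMap]
  simp

-- ===== VERDICT =====
theorem get_operators_priority_spec : Claim_equal_get_operators_priority := by
  unfold Claim_equal_get_operators_priority
  intro ops _
  unfold Spec_get_operators_priority get_operators_priority get_operators_priority_alt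
  rw [pvDfsA_succ_nil]
  refine List.flatMap_congr (fun a _ => ?_)
  rw [pvDfsA_succ_nil]
  simp only [List.contains_nil, if_false, Bool.false_eq_true, List.nil_append]
  refine List.flatMap_congr (fun b _ => ?_)
  rw [pvDfsA_succ_nil]
  by_cases hba : b = a
  · simp [hba]
  · rw [if_neg (by simpa using hba), if_pos hba]
    refine List.flatMap_congr (fun c _ => ?_)
    by_cases hca : c = a <;> by_cases hcb : c = b <;>
      simp [pvDfsA, hca, hcb]
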